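-- pv_equiv track=rewrite | github.com/livelifelively/pipeline.loksabha-qna | apps/py/parliament_questions/document_processing.py | find_potential_continuous_table_pages
-- ===== SOURCE A (Python) =====
-- def find_potential_continuous_table_pages(tables_summary: list) -> list[tuple[int, int]]:
--     """
--     Find continuous page ranges that might contain potential multi-page tables.
--     Only includes ranges where start and end pages are different.
--
--     Args:
--         tables_summary: List of table information dictionaries containing 'page' field
--
--     Returns:
--         List of tuples containing (start_page, end_page) for continuous table ranges
--         where start_page != end_page, indicating potential multi-page tables
--     """
--     if not tables_summary:
--         return []
--
--     # Sort tables by page number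
--     sorted_tables = sorted(tables_summary, key=lambda x: x["page"])
--
--     potential_ranges = []
--     start_page = sorted_tables[0]["page"]
--     prev_page = start_page
--
--     for table in sorted_tables[1:]:
--         current_page = table["page"]
--
--         # If pages are not continuous, save the range and start a new one
--         if current_page - prev_page > 1:
--             # Only add range if start and end pages are different
--             if start_page != prev_page:
--                 potential_ranges.append((start_page, prev_page))
--             start_page = current_page
--
--         prev_page = current_page
--
--     # Add the last range only if start and end pages are different
--     if start_page != prev_page:
--         potential_ranges.append((start_page, prev_page))
--
--     return potential_ranges
-- ===== SOURCE B (Python) =====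
-- def find_potential_continuous_table_pages(tables_summary: list) -> list[tuple[int, int]]:
--     """Set-based re-implementation: collect the distinct page numbers, then for
--     each run start (page-1 absent) walk forward through the set to the run end."""
--     pages = {table["page"] for table in tables_summary}
--     ranges = []
--     for page in sorted(pages):
--         if page - 1 not in pages:
--             end = page
--             while end + 1 in pages:
--                 end += 1
--             if end != page:
--                 ranges.append((page, end))
--     return ranges
-- ===== Notes on version B (the rewrite author's own statement) =====
-- stated objective: alternative
-- what changed: Replaces A's sort-all-tables-then-stateful-gap-scan with a set of distinct page numbers: each run start (page-1 absent from the set) is extended forward by membership tests to its run end, so duplicates are handled by the set instead of by the scan state.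
import Mathlib
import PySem

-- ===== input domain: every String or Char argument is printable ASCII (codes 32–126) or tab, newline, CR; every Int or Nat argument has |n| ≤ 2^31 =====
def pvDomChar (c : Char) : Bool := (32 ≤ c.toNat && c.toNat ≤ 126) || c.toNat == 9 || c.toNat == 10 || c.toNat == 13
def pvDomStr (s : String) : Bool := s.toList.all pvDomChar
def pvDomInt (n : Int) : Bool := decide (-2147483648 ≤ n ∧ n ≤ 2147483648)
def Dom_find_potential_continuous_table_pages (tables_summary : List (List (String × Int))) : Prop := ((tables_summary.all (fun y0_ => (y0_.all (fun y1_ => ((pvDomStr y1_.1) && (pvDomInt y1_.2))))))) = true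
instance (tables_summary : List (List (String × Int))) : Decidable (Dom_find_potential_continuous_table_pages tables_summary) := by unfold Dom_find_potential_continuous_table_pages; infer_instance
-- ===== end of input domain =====

-- B replaces A's sort-then-stateful-gap-scan by a set of page numbers walked forward
-- from each run start; a different data-structure strategy of similar cost (objective: alternative).

-- ===== PORT A =====
-- x["page"]: under Pre_ every table contains the key "page", so Python's x["page"]
-- equals Dict.getD _ "page" 0 (the default is never used inside Pre_).
def pvPageOf (table : List (String × Int)) : Int :=
  PySem.Dict.getD (PySem.Dict.mk table) "page" 0

-- the loop body of A ('if current_page - prev_page > 1: …'), state = (ranges, start, prev)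
def pvStepA (st : List (Int × Int) × Int × Int) (current_page : Int) : List (Int × Int) × Int × Int :=
  if current_page - st.2.2 > 1 then
    (if st.2.1 ≠ st.2.2 then st.1 ++ [(st.2.1, st.2.2)] else st.1, current_page, current_page)
  else (st.1, st.2.1, current_page)

-- the trailing 'if start_page != prev_page: potential_ranges.append(…)'
def pvFinishA (st : List (Int × Int) × Int × Int) : List (Int × Int) :=
  if st.2.1 ≠ st.2.2 then st.1 ++ [(st.2.1, st.2.2)] else st.1

def find_potential_continuous_table_pages (tables_summary : List (List (String × Int))) : List (Int × Int) :=
  if tables_summary = [] then []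
  else
    let sorted_tables := PySem.List.sorted tables_summary pvPageOf false
    let start_page := pvPageOf sorted_tables.headI
    pvFinishA (sorted_tables.tail.foldl (fun st table => pvStepA st (pvPageOf table))
      ([], start_page, start_page))

-- ===== PORT B =====
-- the while-loop 'while end+1 in pages: end += 1'; the fuel argument (the set's size)
-- only makes the recursion structural — it is never exhausted, the run stays inside the set.
def pvExtend (pages : PySem.Set Int) : Int → Nat → Int
  | e, 0 => e
  | e, f + 1 => if PySem.Set.contains pages (e + 1) then pvExtend pages (e + 1) f else e

-- the loop body of B: emit (page, end of run) when page starts a multi-page run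
def pvStepB (pages : PySem.Set Int) (F : Nat) (ranges : List (Int × Int)) (page : Int) : List (Int × Int) :=
  if ¬ PySem.Set.contains pages (page - 1) then
    (if pvExtend pages page F ≠ page then ranges ++ [(page, pvExtend pages page F)] else ranges)
  else ranges

def find_potential_continuous_table_pages_alt (tables_summary : List (List (String × Int))) : List (Int × Int) :=
  let pages : PySem.Set Int := PySem.Set.ofList (tables_summary.map pvPageOf)
  (PySem.List.sorted pages (fun x => x) false).foldl (pvStepB pages pages.length) []

-- ===== PRECONDITION & SPEC =====
-- Pre_ excludes exactly the inputs where Python's x["page"] raises KeyError.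
def Pre_find_potential_continuous_table_pages (tables_summary : List (List (String × Int))) : Prop :=
  ∀ table ∈ tables_summary, PySem.Dict.contains (PySem.Dict.mk table) "page" = true
instance (tables_summary : List (List (String × Int))) : Decidable (Pre_find_potential_continuous_table_pages tables_summary) := by unfold Pre_find_potential_continuous_table_pages; infer_instance

def pvWitness_find_potential_continuous_table_pages : (List (List (String × Int))) :=
  [[("page", 3)], [("page", 1)], [("page", 2)], [("page", 7)]]

def Spec_find_potential_continuous_table_pages (tables_summary : List (List (String × Int))) (out : List (Int × Int)) : Prop := out = find_potential_continuous_table_pages_alt tables_summary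
instance (tables_summary : List (List (String × Int))) (out : List (Int × Int)) : Decidable (Spec_find_potential_continuous_table_pages tables_summary out) := by unfold Spec_find_potential_continuous_table_pages; infer_instance

-- ===== CLAIM (what is proved, stated in full; the proofs are below) =====
def Claim_equal_find_potential_continuous_table_pages : Prop := ∀ (tables_summary : List (List (String × Int))), Dom_find_potential_continuous_table_pages tables_summary → Pre_find_potential_continuous_table_pages tables_summary → Spec_find_potential_continuous_table_pages tables_summary (find_potential_continuous_table_pages tables_summary)

-- ===== LEMMAS AND PROOFS =====

-- A's scan, recursively (accumulator removed).
def goA (start prev : Int) : List Int → List (Int × Int)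
  | [] => if start ≠ prev then [(start, prev)] else []
  | c :: r =>
    if c - prev > 1 then
      (if start ≠ prev then (start, prev) :: goA c c r else goA c c r)
    else goA start c r

-- B's loop, recursively (accumulator removed).
def goB (pages : PySem.Set Int) (F : Nat) : List Int → List (Int × Int)
  | [] => []
  | c :: r => pvStepB pages F [] c ++ goB pages F r

-- removal of duplicates of the previous value (adjacent dedup of a sorted list)
def myDedup (p : Int) : List Int → List Int
  | [] => []
  | c :: r => if c = p then myDedup p r else c :: myDedup c r

theorem foldlA_eq_goA (l : List Int) : ∀ (acc : List (Int × Int)) (s p : Int),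
    pvFinishA (l.foldl pvStepA (acc, s, p)) = acc ++ goA s p l := by
  induction l with
  | nil =>
    intro acc s p
    by_cases hs : s = p <;> simp [pvFinishA, goA, hs]
  | cons c r ih =>
    intro acc s p
    rw [List.foldl_cons]
    by_cases h : c - p > 1
    · by_cases hs : s = p
      · have hstep : pvStepA (acc, s, p) c = (acc, c, c) := by simp [pvStepA, h, hs]
        rw [hstep, ih]
        simp [goA, h, hs]
      · have hstep : pvStepA (acc, s, p) c = (acc ++ [(s, p)], c, c) := by
          simp [pvStepA, h, hs]
        rw [hstep, ih]
        simp [goA, h, hs]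
    · have hstep : pvStepA (acc, s, p) c = (acc, s, c) := by simp [pvStepA, h]
      rw [hstep, ih]
      simp [goA, h]

theorem pvStepB_acc (pages : PySem.Set Int) (F : Nat) (acc : List (Int × Int)) (c : Int) :
    pvStepB pages F acc c = acc ++ pvStepB pages F [] c := by
  unfold pvStepB; split_ifs <;> simp

theorem foldlB_eq_goB (pages : PySem.Set Int) (F : Nat) (l : List Int) :
    ∀ (acc : List (Int × Int)),
    l.foldl (pvStepB pages F) acc = acc ++ goB pages F l := by
  induction l with
  | nil => intro acc; simp [goB]
  | cons c r ih =>
    intro acc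
    rw [List.foldl_cons, pvStepB_acc, ih, goB, List.append_assoc]

theorem goA_myDedup : ∀ (l : List Int) (s p : Int), goA s p l = goA s p (myDedup p l) := by
  intro l
  induction l with
  | nil => intro s p; simp [myDedup]
  | cons c r ih =>
    intro s p
    by_cases hc : c = p
    · subst hc
      simp [myDedup, goA, ih]
    · simp only [myDedup, hc, ite_false, goA]
      by_cases h : c - p > 1 <;> simp [h, ih]

theorem mem_myDedup : ∀ (l : List Int) (p x : Int), List.Pairwise (· ≤ ·) l →
    (∀ y ∈ l, p ≤ y) → (x ∈ myDedup p l ↔ x ∈ l ∧ x ≠ p) := by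
  intro l
  induction l with
  | nil => intro p x _ _; simp [myDedup]
  | cons c r ih =>
    intro p x hpw hle
    rcases List.pairwise_cons.mp hpw with ⟨hcr, hr⟩
    by_cases hc : c = p
    · subst hc
      simp only [myDedup, ite_true]
      rw [ih c x hr hcr]
      constructor
      · rintro ⟨hx, hne⟩; exact ⟨List.mem_cons_of_mem _ hx, hne⟩
      · rintro ⟨hx, hne⟩
        rcases List.mem_cons.mp hx with h | h
        · exact absurd h hne
        · exact ⟨h, hne⟩
    · have hpc : p < c := lt_of_le_of_ne (hle c List.mem_cons_self) (fun h => hc h.symm)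
      simp only [myDedup, hc, ite_false, List.mem_cons]
      rw [ih c x hr hcr]
      constructor
      · rintro (h | ⟨hx, hne⟩)
        · exact ⟨Or.inl h, by omega⟩
        · have := hcr x hx; exact ⟨Or.inr hx, by omega⟩
      · rintro ⟨h | h, hne⟩
        · exact Or.inl h
        · by_cases hxc : x = c
          · exact Or.inl hxc
          · exact Or.inr ⟨h, hxc⟩

theorem pairwise_myDedup : ∀ (l : List Int) (p : Int), List.Pairwise (· ≤ ·) l →
    (∀ y ∈ l, p ≤ y) → List.Pairwise (· < ·) (p :: myDedup p l) := by
  intro l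
  induction l with
  | nil => intro p _ _; simp [myDedup]
  | cons c r ih =>
    intro p hpw hle
    rcases List.pairwise_cons.mp hpw with ⟨hcr, hr⟩
    by_cases hc : c = p
    · subst hc; simpa [myDedup] using ih c hr hcr
    · have hpc : p < c := lt_of_le_of_ne (hle c List.mem_cons_self) (fun h => hc h.symm)
      have hrec := ih c hr hcr
      simp only [myDedup, hc, ite_false]
      refine List.pairwise_cons.mpr ⟨?_, hrec⟩
      intro y hy
      rcases List.mem_cons.mp hy with h | h
      · omega
      · have := (mem_myDedup r c y hr hcr).mp h
        have := hcr y this.1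
        omega

-- The core lemma: on a strictly increasing tail, A's scan equals
-- "emit the current run via pvExtend, then B's per-element loop on the tail".
theorem main_lemma (S : PySem.Set Int) (F : Nat) :
    ∀ (l2 : List Int) (s p : Int) (f : Nat),
      List.Pairwise (· < ·) (p :: l2) →
      p ∈ S →
      (∀ x : Int, p < x → (x ∈ S ↔ x ∈ l2)) →
      l2.length ≤ f → l2.length ≤ F →
      goA s p l2 = (if s ≠ pvExtend S p f then [(s, pvExtend S p f)] else []) ++ goB S F l2 := by
  intro l2
  induction l2 with
  | nil =>
    intro s p f _ _ hmem _ _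
    have hnp : p + 1 ∉ S := by
      intro h; simpa using (hmem (p + 1) (by omega)).mp h
    have hext : pvExtend S p f = p := by
      cases f with
      | zero => rfl
      | succ f => simp [pvExtend, hnp]
    by_cases hs : s = p <;> simp [goA, goB, hext, hs]
  | cons c r ih =>
    intro s p f hpw hpS hmem hf hF
    rcases List.pairwise_cons.mp hpw with ⟨hplt, hcr⟩
    have hpc : p < c := hplt c List.mem_cons_self
    have hcS : c ∈ S := (hmem c hpc).mpr List.mem_cons_self
    have hcrlt : ∀ y ∈ r, c < y := fun y hy => (List.pairwise_cons.mp hcr).1 y hy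
    have hmem' : ∀ x : Int, c < x → (x ∈ S ↔ x ∈ r) := by
      intro x hx
      rw [hmem x (by omega)]
      constructor
      · intro h; rcases List.mem_cons.mp h with h | h
        · omega
        · exact h
      · intro h; exact List.mem_cons_of_mem _ h
    by_cases hgap : c - p > 1
    · -- gap: the run ends at p; a new run starts at c
      have hnp : p + 1 ∉ S := by
        intro h
        rcases List.mem_cons.mp ((hmem (p + 1) (by omega)).mp h) with h | h
        · omega
        · have := hcrlt _ h; omega
      have hext : pvExtend S p f = p := by
        cases f with
        | zero => rfl
        | succ f => simp [pvExtend, hnp]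
      have hnc : c - 1 ∉ S := by
        intro h
        rcases List.mem_cons.mp ((hmem (c - 1) (by omega)).mp h) with h | h
        · omega
        · have := hcrlt _ h; omega
      have hrec := ih c c F hcr hcS hmem'
        (by simp at hF; omega) (by simp at hF; omega)
      have hstep : pvStepB S F [] c
          = (if c ≠ pvExtend S c F then [(c, pvExtend S c F)] else []) := by
        simp only [pvStepB, PySem.Set.contains_iff]
        rcases eq_or_ne (pvExtend S c F) c with he | he <;> simp [hnc, he, Ne.symm]
      rw [goB, hstep, hext]
      simp only [goA, hgap, ite_true]
      by_cases hs : s = p <;> simp [hs, hrec]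
    · -- no gap: c = p + 1, the run continues
      have hc1 : c = p + 1 := by omega
      obtain ⟨f', rfl⟩ : ∃ f', f = f' + 1 := by
        cases f with
        | zero => simp at hf
        | succ f => exact ⟨f, rfl⟩
      have hS1 : p + 1 ∈ S := hc1 ▸ hcS
      have hext : pvExtend S p (f' + 1) = pvExtend S c f' := by
        simp [pvExtend, hS1, hc1]
      have hskip : pvStepB S F [] c = [] := by
        have : c - 1 ∈ S := by rw [hc1]; simpa using hpS
        simp [pvStepB, this]
      have hrec := ih s c f' hcr hcS hmem'
        (by simp at hf; omega) (by simp at hF; omega)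
      rw [goB, hskip, List.nil_append]
      simp only [goA, hgap, ite_false]
      rw [hext] at *
      exact hrec

-- ===== VERDICT (by name: the statement is the Claim_ definition above) =====
theorem find_potential_continuous_table_pages_spec : Claim_equal_find_potential_continuous_table_pages := by
  intro ts _ _
  unfold Spec_find_potential_continuous_table_pages
  by_cases hts : ts = []
  · subst hts; rfl
  · -- nonempty input
    obtain ⟨a, st', hst⟩ : ∃ a st', PySem.List.sorted ts pvPageOf false = a :: st' := by
      rcases h : PySem.List.sorted ts pvPageOf false with _ | ⟨a, st'⟩
      · exact absurd ((PySem.List.sorted_eq_nil_iff ts pvPageOf false).mp h) hts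
      · exact ⟨a, st', rfl⟩
    set h0 : Int := pvPageOf a with hh0
    set tl : List Int := st'.map pvPageOf with htl
    -- the sorted page list
    have hps : (PySem.List.sorted ts pvPageOf false).map pvPageOf
        = PySem.List.sorted (ts.map pvPageOf) (fun x => x) false := by
      refine (PySem.List.sorted_id_eq_of_perm_of_pairwise _ _ ?_ ?_).symm
      · exact (PySem.List.sorted_perm ts pvPageOf false).map pvPageOf
      · exact PySem.List.sorted_map_key_pairwise ts pvPageOf
    have hps' : PySem.List.sorted (ts.map pvPageOf) (fun x => x) false = h0 :: tl := by
      rw [← hps, hst]; simp [hh0, htl]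
    -- ordering facts about h0 :: tl
    have hpwle : List.Pairwise (· ≤ ·) (h0 :: tl) := by
      have := PySem.List.sorted_pairwise (ts.map pvPageOf) (fun x => x)
      rwa [hps'] at this
    rcases List.pairwise_cons.mp hpwle with ⟨hle, hpwtl⟩
    -- the set of pages and the strictly sorted dedup
    set S : PySem.Set Int := PySem.Set.ofList (ts.map pvPageOf) with hS
    set l' : List Int := h0 :: myDedup h0 tl with hl'
    have hstrict : List.Pairwise (· < ·) l' := pairwise_myDedup tl h0 hpwtl hle
    have hmemd : ∀ x, x ∈ myDedup h0 tl ↔ x ∈ tl ∧ x ≠ h0 :=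
      fun x => mem_myDedup tl h0 x hpwtl hle
    have hmemS : ∀ x : Int, x ∈ S ↔ x = h0 ∨ x ∈ tl := by
      intro x
      rw [hS, PySem.Set.mem_ofList]
      have := PySem.List.mem_sorted (ts.map pvPageOf) (fun x => x) false x
      rw [hps'] at this
      rw [← this, List.mem_cons]
    have hmeml' : ∀ x : Int, x ∈ l' ↔ x ∈ S := by
      intro x
      rw [hmemS, hl', List.mem_cons, hmemd x]
      constructor
      · rintro (h | ⟨h, _⟩)
        · exact Or.inl h
        · exact Or.inr h
      · rintro (h | h)
        · exact Or.inl h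
        · by_cases hx : x = h0
          · exact Or.inl hx
          · exact Or.inr ⟨h, hx⟩
    have hsp : PySem.List.sorted S (fun x => x) false = l' := by
      refine PySem.List.sorted_eq_of_perm_of_pairwise_lt S l' (fun x => x) ?_ hstrict
      refine (List.perm_ext_iff_of_nodup ?_ (PySem.Set.nodup_ofList _)).mpr hmeml'
      exact List.Pairwise.imp (fun h => ne_of_lt h) hstrict
    have hlen : l'.length ≤ S.length := by
      rw [← hsp]
      exact le_of_eq (PySem.List.length_sorted S (fun x => x) false)
    have hdlen : (myDedup h0 tl).length ≤ S.length := by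
      rw [hl'] at hlen; simp at hlen; omega
    -- evaluate port B
    have hB : find_potential_continuous_table_pages_alt ts
        = pvStepB S S.length [] h0 ++ goB S S.length (myDedup h0 tl) := by
      show (PySem.List.sorted S (fun x => x) false).foldl (pvStepB S S.length) []
        = pvStepB S S.length [] h0 ++ goB S S.length (myDedup h0 tl)
      rw [hsp, hl', foldlB_eq_goB, goB, List.nil_append]
    -- evaluate port A down to goA over the strictly sorted tail
    have hA : find_potential_continuous_table_pages ts = goA h0 h0 (myDedup h0 tl) := by
      unfold find_potential_continuous_table_pages
      rw [if_neg hts]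
      show pvFinishA ((PySem.List.sorted ts pvPageOf false).tail.foldl
          (fun st table => pvStepA st (pvPageOf table))
          ([], pvPageOf (PySem.List.sorted ts pvPageOf false).headI,
               pvPageOf (PySem.List.sorted ts pvPageOf false).headI))
        = goA h0 h0 (myDedup h0 tl)
      rw [hst]
      show pvFinishA (st'.foldl (fun st table => pvStepA st (pvPageOf table)) ([], h0, h0))
        = goA h0 h0 (myDedup h0 tl)
      rw [← List.foldl_map (f := pvPageOf) (g := pvStepA), ← htl, foldlA_eq_goA, List.nil_append,
        goA_myDedup]
    -- membership facts for the core lemma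
    have hh0S : h0 ∈ S := (hmemS h0).mpr (Or.inl rfl)
    have hmemgt : ∀ x : Int, h0 < x → (x ∈ S ↔ x ∈ myDedup h0 tl) := by
      intro x hx
      rw [hmemS, hmemd]
      constructor
      · rintro (h | h)
        · omega
        · exact ⟨h, by omega⟩
      · rintro ⟨h, _⟩; exact Or.inr h
    have hmain := main_lemma S S.length (myDedup h0 tl) h0 h0 S.length
      hstrict hh0S hmemgt hdlen hdlen
    -- B's head emission equals the head of the main lemma's right-hand side
    have hnh : h0 - 1 ∉ S := by
      intro hmem
      rcases (hmemS (h0 - 1)).mp hmem with h | h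
      · omega
      · have := hle _ h; omega
    have hstep : pvStepB S S.length [] h0
        = (if h0 ≠ pvExtend S h0 S.length then [(h0, pvExtend S h0 S.length)] else []) := by
      simp only [pvStepB, PySem.Set.contains_iff]
      rcases eq_or_ne (pvExtend S h0 S.length) h0 with he | he <;> simp [hnh, he, Ne.symm]
    rw [hA, hB, hstep, hmain]
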